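-- pv_equiv track=rewrite | github.com/MOysolova/Python | exam/4-Cinema-Seats/cinema.py | order_of_seats
-- ===== SOURCE A (Python) =====
-- def find_least(cinema):
--     least = cinema[0]
--     for n in cinema:
--         if 0 in n:
--             if least.count(0) == 0 or least.count(0) > n.count(0):
--                 least = n
--     return least
--
-- def find_start_index(cinema):
--     least = find_least(cinema)
--     least_row = cinema.index(least)
--     next_index = least.index(0)
--     return least_row, next_index
--
-- def order_of_seats(cinema):
--     expected = []
--     for n in cinema:
--         while 0 in n:
--             index_list = find_start_index(cinema)
--             expected.append(tuple([index_list[0] + 1, index_list[1] + 1]))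
--             cinema[index_list[0]][index_list[1]] = 1
--
--     return expected
-- ===== SOURCE B (Python) =====
-- def order_of_seats(cinema):
--     # Counting-bucket strategy: tally each row's empty seats once, then sweep
--     # occupancy classes c = 1..max upward, emitting each selected row's empty
--     # positions left-to-right.  (Unlike A, does not mutate `cinema` in place.)
--     rows = [(row.count(0), i, row) for i, row in enumerate(cinema)]
--     top = max((cnt for cnt, _, _ in rows), default=0)
--     expected = []
--     for c in range(1, top + 1):
--         for cnt, i, row in rows:
--             if cnt == c:
--                 for j, x in enumerate(row):
--                     if x == 0:
--                         expected.append((i + 1, j + 1))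
--     return expected
-- ===== Notes on version B (the rewrite author's own statement) =====
-- stated objective: alternative
-- what changed: Instead of repeatedly rescanning the whole hall for the least-occupied row and mutating it seat by seat, B counts each row's empty seats once and sweeps occupancy classes c = 1..max upward, emitting each row's empty positions left-to-right (B does not mutate the input in place, unlike A; the return value is identical).
import Mathlib
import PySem

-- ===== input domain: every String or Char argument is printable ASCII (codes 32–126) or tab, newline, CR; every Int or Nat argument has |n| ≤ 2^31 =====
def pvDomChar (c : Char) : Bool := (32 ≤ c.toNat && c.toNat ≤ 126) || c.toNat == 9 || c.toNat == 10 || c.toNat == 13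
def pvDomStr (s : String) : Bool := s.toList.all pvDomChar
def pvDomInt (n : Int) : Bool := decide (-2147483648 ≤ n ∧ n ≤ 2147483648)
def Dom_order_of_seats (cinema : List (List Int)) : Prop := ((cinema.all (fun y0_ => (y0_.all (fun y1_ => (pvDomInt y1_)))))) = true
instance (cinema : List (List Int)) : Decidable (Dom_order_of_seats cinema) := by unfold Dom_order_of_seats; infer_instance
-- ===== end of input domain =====

-- B replaces A's repeated least-occupied-row rescans by one count pass plus an upward
-- sweep over occupancy classes (a different algorithm, same return value); A mutates
-- `cinema` in place, B does not — the equivalence proved here is about the return value.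


-- ===== PORT A =====
-- least = cinema[0]; for n in cinema: if 0 in n: if least.count(0)==0 or least.count(0)>n.count(0): least = n
-- (cinema[0] exists at every call site below: find_least is only reached with a nonempty cinema,
--  so the head is passed explicitly as c0.)
def find_least (c0 : List Int) (cinema : List (List Int)) : List Int :=
  cinema.foldl (fun least n =>
    if (0 : Int) ∈ n then
      if PySem.List.count least 0 = 0 ∨ PySem.List.count n 0 < PySem.List.count least 0 then n
      else least
    else least) c0

-- least_row = cinema.index(least); next_index = least.index(0)  (none = IndexError/ValueError)
def find_start_index (cinema : List (List Int)) : Option (Nat × Nat) :=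
  match cinema with
  | [] => none
  | c0 :: _ =>
    let least := find_least c0 cinema
    match PySem.List.index? cinema least, PySem.List.index? least 0 with
    | some r, some j => some (r, j)
    | _, _ => none

-- the inner `while 0 in n` loop; `n` aliases row k of the mutating cinema, so the
-- condition reads the current row k.  fuel is a totality guard only: the caller passes
-- the total number of zeros, which bounds the iteration count (each pass fills one 0).
def fillLoop : Nat → List (List Int) → Nat → List (List Int) → (List (List Int)) × (List (List Int))
  | 0, st, _, acc => (st, acc)
  | fuel+1, st, k, acc =>
    if (0 : Int) ∈ st.getD k [] then
      match find_start_index st with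
      | some (r, j) =>
          fillLoop fuel (st.set r ((st.getD r []).set j 1)) k (acc ++ [[(r : Int) + 1, (j : Int) + 1]])
      | none => (st, acc)
    else (st, acc)

-- total number of zeros in the hall (the fuel bound for each while loop)
def tz (st : List (List Int)) : Nat := (st.map (fun n => PySem.List.count n 0)).sum

def order_of_seats (cinema : List (List Int)) : List (List Int) :=
  ((List.range cinema.length).foldl
    (fun (p : (List (List Int)) × (List (List Int))) k => fillLoop (tz p.1) p.1 k p.2)
    (cinema, [])).2

-- ===== PORT B =====
def order_of_seats_alt (cinema : List (List Int)) : List (List Int) :=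
  let rows := (PySem.List.enumerate cinema).map (fun p => ((PySem.List.count p.2 0 : Int), p.1, p.2))
  let top := PySem.List.maxD (rows.map (fun t => t.1)) (fun x => x) 0
  (PySem.List.pyRange 1 (top + 1) 1).foldl (fun acc c =>
    rows.foldl (fun acc2 t =>
      if t.1 = c then
        (PySem.List.enumerate t.2.2).foldl (fun acc3 q =>
          if q.2 = 0 then acc3 ++ [[t.2.1 + 1, q.1 + 1]] else acc3) acc2
      else acc2) acc) []

-- ===== PRECONDITION & SPEC =====
def Spec_order_of_seats (cinema : List (List Int)) (out : List (List Int)) : Prop := out = order_of_seats_alt cinema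
instance (cinema : List (List Int)) (out : List (List Int)) : Decidable (Spec_order_of_seats cinema out) := by unfold Spec_order_of_seats; infer_instance

-- ===== CLAIM (what is proved, stated in full; the proofs are below) =====
def Claim_equal_order_of_seats : Prop := ∀ (cinema : List (List Int)), Dom_order_of_seats cinema → Spec_order_of_seats cinema (order_of_seats cinema)

-- ===== LEMMAS AND PROOFS =====

-- abbreviation used throughout: number of zeros in a row
def cnt (n : List Int) : Nat := PySem.List.count n 0

-- first row with minimal positive zero count, with its index (proof-side spec)
def pickMin : List (List Int) → Option (Nat × List Int)
  | [] => none
  | n :: l =>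
    match pickMin l with
    | none => if (0 : Int) ∈ n then some (0, n) else none
    | some (k, b) =>
      if (0 : Int) ∈ n ∧ cnt n ≤ cnt b then some (0, n)
      else some (k + 1, b)

-- the full greedy fill sequence, with fuel
def greedy : Nat → List (List Int) → List (List Int)
  | 0, _ => []
  | fuel+1, st =>
    match find_start_index st with
    | some (r, j) => [(r : Int) + 1, (j : Int) + 1] :: greedy fuel (st.set r ((st.getD r []).set j 1))
    | none => []

-- zero positions of a row (1-based pairs), row enumerated from s
def zpos (i : Int) (row : List Int) (s : Int) : List (List Int) :=
  ((PySem.List.enumerate row s).filter (fun q => decide (q.2 = (0 : Int)))).map (fun q => [i + 1, q.1 + 1])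

def bucketsP (l : List (List Int)) (s : Int) (c : Int) : List (List Int) :=
  (PySem.List.enumerate l s).flatMap (fun p => if (cnt p.2 : Int) = c then zpos p.1 p.2 0 else [])

def BexprM (st : List (List Int)) (M : Int) : List (List Int) :=
  (PySem.List.pyRange 1 (M + 1) 1).flatMap (fun c => bucketsP st 0 c)

-- ---------- basic facts ----------
lemma cnt_eq_zero {n : List Int} : cnt n = 0 ↔ (0 : Int) ∉ n := by
  simp [cnt, PySem.List.count_eq, List.count_eq_zero]

lemma cnt_pos {n : List Int} (h : (0 : Int) ∈ n) : 0 < cnt n := by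
  rcases Nat.eq_zero_or_pos (cnt n) with h0 | h0
  · exact absurd h (cnt_eq_zero.mp h0)
  · exact h0

lemma tz_append (x y : List (List Int)) : tz (x ++ y) = tz x + tz y := by
  simp [tz]

lemma tz_cons (n : List Int) (l : List (List Int)) : tz (n :: l) = cnt n + tz l := by
  simp [tz, cnt]

lemma tz_eq_zero_iff {l : List (List Int)} : tz l = 0 ↔ ∀ n ∈ l, (0 : Int) ∉ n := by
  induction l with
  | nil => simp [tz]
  | cons n l ih =>
    rw [tz_cons]
    simp only [List.mem_cons]
    constructor
    · rintro h m (rfl | hm)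
      · exact cnt_eq_zero.mp (by omega)
      · exact (ih.mp (by omega)) m hm
    · intro h
      have h1 : cnt n = 0 := cnt_eq_zero.mpr (h n (Or.inl rfl))
      have h2 : tz l = 0 := ih.mpr (fun m hm => h m (Or.inr hm))
      omega

-- ---------- pickMin ----------
lemma pickMin_none_iff (l : List (List Int)) : pickMin l = none ↔ ∀ n ∈ l, (0 : Int) ∉ n := by
  induction l with
  | nil => simp [pickMin]
  | cons n l ih =>
    simp only [pickMin]
    rcases hp : pickMin l with _ | ⟨k, b⟩
    · have hl := ih.mp hp
      by_cases hn : (0 : Int) ∈ n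
      · rw [if_pos hn]
        simp only [List.mem_cons]
        constructor
        · intro h; cases h
        · intro h; exact absurd hn (h n (Or.inl rfl))
      · rw [if_neg hn]
        simp only [List.mem_cons, true_iff]
        rintro m (rfl | hm)
        · exact hn
        · exact hl m hm
    · have hl : ¬ ∀ n ∈ l, (0 : Int) ∉ n := by
        intro h; rw [ih.mpr h] at hp; cases hp
      dsimp only
      constructor
      · intro h
        by_cases hc : (0 : Int) ∈ n ∧ cnt n ≤ cnt b
        · rw [if_pos hc] at h; cases h
        · rw [if_neg hc] at h; cases h
      · intro h
        exact absurd (fun m hm => h m (List.mem_cons_of_mem _ hm)) hl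

lemma pickMin_spec {l : List (List Int)} {k : Nat} {b : List Int}
    (h : pickMin l = some (k, b)) :
    (0 : Int) ∈ b ∧ (∀ n ∈ l, (0 : Int) ∈ n → cnt b ≤ cnt n) ∧
      ∃ pre suf, l = pre ++ b :: suf ∧ pre.length = k ∧
        ∀ n ∈ pre, ¬((0 : Int) ∈ n ∧ cnt n ≤ cnt b) := by
  induction l generalizing k b with
  | nil => simp [pickMin] at h
  | cons n l ih =>
    simp only [pickMin] at h
    rcases hp : pickMin l with _ | ⟨k', b'⟩ <;> rw [hp] at h <;> dsimp only at h
    · by_cases hn : (0 : Int) ∈ n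
      · rw [if_pos hn] at h
        simp only [Option.some.injEq, Prod.mk.injEq] at h
        obtain ⟨rfl, rfl⟩ := h
        refine ⟨hn, ?_, [], l, rfl, rfl, by simp⟩
        simp only [List.mem_cons]
        rintro m (rfl | hm) _
        · exact le_refl _
        · exact absurd ‹(0:Int) ∈ m› ((pickMin_none_iff l).mp hp m hm)
      · rw [if_neg hn] at h; cases h
    · by_cases hc : (0 : Int) ∈ n ∧ cnt n ≤ cnt b'
      · rw [if_pos hc] at h
        simp only [Option.some.injEq, Prod.mk.injEq] at h
        obtain ⟨rfl, rfl⟩ := h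
        obtain ⟨hb', hmin', _⟩ := ih hp
        refine ⟨hc.1, ?_, [], l, rfl, rfl, by simp⟩
        simp only [List.mem_cons]
        rintro m (rfl | hm) hm0
        · exact le_refl _
        · exact le_trans hc.2 (hmin' m hm hm0)
      · rw [if_neg hc] at h
        simp only [Option.some.injEq, Prod.mk.injEq] at h
        obtain ⟨rfl, rfl⟩ := h
        obtain ⟨hb', hmin', pre, suf, hsplit, hlen, hpre⟩ := ih hp
        refine ⟨hb', ?_, n :: pre, suf, by rw [hsplit]; rfl, by simp [hlen], ?_⟩
        · simp only [List.mem_cons]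
          rintro m (rfl | hm) hm0
          · rcases not_and_or.mp hc with h1 | h1
            · exact absurd hm0 h1
            · omega
          · exact hmin' m hm hm0
        · simp only [List.mem_cons]
          rintro m (rfl | hm)
          · exact hc
          · exact hpre m hm

-- ---------- find_least / find_start_index ----------
lemma cnt_def (n : List Int) : PySem.List.count n 0 = cnt n := rfl

lemma find_least_spec (l : List (List Int)) (a : List Int) :
    find_least a l = (match pickMin l with
      | none => a
      | some (_, b) => if (0 : Int) ∉ a ∨ cnt b < cnt a then b else a) := by
  induction l generalizing a with
  | nil => simp [find_least, pickMin]
  | cons n l ih =>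
    simp only [find_least, List.foldl_cons, cnt_def] at ih ⊢
    simp only [pickMin]
    rcases hpl : pickMin l with _ | ⟨k, b⟩ <;> dsimp only <;>
      rw [hpl] at ih <;> dsimp only at ih
    · by_cases hn : (0 : Int) ∈ n
      · have hn' := cnt_pos hn
        rw [if_pos hn, if_pos hn]
        dsimp only
        by_cases ha : (0 : Int) ∈ a
        · have ha' := cnt_pos ha
          by_cases hlt : cnt n < cnt a
          · rw [if_pos (by omega : cnt a = 0 ∨ cnt n < cnt a), ih, if_pos (by right; exact hlt)]
          · rw [if_neg (by omega : ¬(cnt a = 0 ∨ cnt n < cnt a)), ih,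
              if_neg (by push Not; exact ⟨ha, by omega⟩)]
        · rw [if_pos (Or.inl (cnt_eq_zero.mpr ha)), ih, if_pos (Or.inl ha)]
      · rw [if_neg hn, if_neg hn, ih]
    · have hb0 := (pickMin_spec hpl).1
      have hb' := cnt_pos hb0
      by_cases hc : (0 : Int) ∈ n ∧ cnt n ≤ cnt b
      · rw [if_pos hc]
        dsimp only
        have hn := hc.1
        have hn' := cnt_pos hn
        have hnb := hc.2
        rw [if_pos hn]
        by_cases ha : (0 : Int) ∈ a
        · have ha' := cnt_pos ha
          by_cases hlt : cnt n < cnt a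
          · rw [if_pos (by omega : cnt a = 0 ∨ cnt n < cnt a), ih,
              if_neg (by push Not; exact ⟨hn, by omega⟩), if_pos (by right; exact hlt)]
          · rw [if_neg (by omega : ¬(cnt a = 0 ∨ cnt n < cnt a)), ih,
              if_neg (by push Not; exact ⟨ha, by omega⟩),
              if_neg (by push Not; exact ⟨ha, by omega⟩)]
        · rw [if_pos (Or.inl (cnt_eq_zero.mpr ha)), ih,
            if_neg (by push Not; exact ⟨hn, by omega⟩), if_pos (Or.inl ha)]
      · rw [if_neg hc]
        dsimp only
        by_cases hn : (0 : Int) ∈ n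
        · have hn' := cnt_pos hn
          have hnb : cnt b < cnt n := by
            push Not at hc
            have := hc hn
            omega
          rw [if_pos hn]
          by_cases ha : (0 : Int) ∈ a
          · have ha' := cnt_pos ha
            by_cases hlt : cnt n < cnt a
            · rw [if_pos (by omega : cnt a = 0 ∨ cnt n < cnt a), ih,
                if_pos (by right; omega), if_pos (by right; omega)]
            · rw [if_neg (by omega : ¬(cnt a = 0 ∨ cnt n < cnt a)), ih]
          · rw [if_pos (Or.inl (cnt_eq_zero.mpr ha)), ih,
              if_pos (Or.inr hnb), if_pos (Or.inl ha)]
        · rw [if_neg hn, ih]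

lemma find_least_eq {c0 : List Int} {rest : List (List Int)} {k : Nat} {b : List Int}
    (h : pickMin (c0 :: rest) = some (k, b)) :
    find_least c0 (c0 :: rest) = b := by
  rw [find_least_spec, h]
  dsimp only
  by_cases hd : (0 : Int) ∉ c0 ∨ cnt b < cnt c0
  · rw [if_pos hd]
  · rw [if_neg hd]
    push Not at hd
    obtain ⟨_, _, pre, suf, hsplit, hlen, hpre⟩ := pickMin_spec h
    rcases pre with _ | ⟨p0, pre'⟩
    · simp only [List.nil_append, List.cons.injEq] at hsplit
      exact hsplit.1
    · exfalso
      have hc0 : c0 = p0 := by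
        have := congrArg (fun l => l.headD []) hsplit
        simpa using this
      exact hpre p0 (List.mem_cons_self) (hc0 ▸ ⟨hd.1, by omega⟩)

lemma index?_of_pickMin {l : List (List Int)} {k : Nat} {b : List Int}
    (h : pickMin l = some (k, b)) : PySem.List.index? l b = some k := by
  obtain ⟨hb, _, pre, suf, hsplit, hlen, hpre⟩ := pickMin_spec h
  rw [(PySem.List.index?_eq_some_iff l b k)]
  refine ⟨pre, suf, hsplit, hlen, ?_⟩
  intro hmem
  exact hpre b hmem ⟨hb, le_refl _⟩

lemma find_start_index_some {l : List (List Int)} {k : Nat} {b : List Int}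
    (h : pickMin l = some (k, b)) :
    ∃ j : Nat, PySem.List.index? b 0 = some j ∧ find_start_index l = some (k, j) := by
  rcases l with _ | ⟨c0, rest⟩
  · simp [pickMin] at h
  · have hb := (pickMin_spec h).1
    obtain ⟨j, hj⟩ := Option.isSome_iff_exists.mp ((PySem.List.index?_isSome_iff b 0).mpr hb)
    refine ⟨j, hj, ?_⟩
    simp only [find_start_index, find_least_eq h]
    rw [index?_of_pickMin h, hj]

-- ---------- the greedy step ----------
lemma set_append_length {α : Type} (pre : List α) (b x : α) (suf : List α) :
    (pre ++ b :: suf).set pre.length x = pre ++ x :: suf := by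
  induction pre with
  | nil => rfl
  | cons h t ih => simp [ih]

lemma getD_append_length {α : Type} (pre : List α) (b : α) (suf : List α) (d : α) :
    (pre ++ b :: suf).getD pre.length d = b := by
  induction pre with
  | nil => rfl
  | cons h t ih => simp

-- row split at the first zero
lemma row_split {b : List Int} {j : Nat} (h : PySem.List.index? b 0 = some j) :
    ∃ bpre bsuf, b = bpre ++ (0 : Int) :: bsuf ∧ bpre.length = j ∧ (0 : Int) ∉ bpre := by
  rcases (PySem.List.index?_eq_some_iff b 0 j).mp h with ⟨bpre, bsuf, h1, h2, h3⟩
  exact ⟨bpre, bsuf, h1, h2, h3⟩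

lemma cnt_split {bpre bsuf : List Int} (h : (0 : Int) ∉ bpre) :
    cnt (bpre ++ (0 : Int) :: bsuf) = cnt bsuf + 1 ∧ cnt (bpre ++ (1 : Int) :: bsuf) = cnt bsuf := by
  have h0 : List.count (0 : Int) bpre = 0 := List.count_eq_zero.mpr h
  constructor <;>
    simp [cnt, PySem.List.count_eq, List.count_append, h0]

-- ---------- greedy fuel ----------
lemma tz_step {st : List (List Int)} {k j : Nat} {b : List Int}
    (hp : pickMin st = some (k, b)) (hj : PySem.List.index? b 0 = some j) :
    tz (st.set k ((st.getD k []).set j 1)) + 1 = tz st := by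
  obtain ⟨hb, _, pre, suf, hsplit, hlen, _⟩ := pickMin_spec hp
  obtain ⟨bpre, bsuf, hb2, hjlen, hbpre⟩ := row_split hj
  subst hsplit
  rw [← hlen, getD_append_length, ← hjlen, hb2, set_append_length, set_append_length,
    tz_append, tz_append, tz_cons, tz_cons, (cnt_split hbpre).1, (cnt_split hbpre).2]
  ring

lemma pickMin_isSome_of_tz_pos {st : List (List Int)} (h : 0 < tz st) :
    ∃ k b, pickMin st = some (k, b) := by
  rcases hp : pickMin st with _ | ⟨k, b⟩
  · have := tz_eq_zero_iff.mpr ((pickMin_none_iff st).mp hp)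
    omega
  · exact ⟨k, b, rfl⟩

lemma zero_free_getD_of_tz_zero {st : List (List Int)} (h : tz st = 0) (m : Nat) :
    (0 : Int) ∉ st.getD m [] := by
  rcases hm : st[m]? with _ | row
  · simp [List.getD, hm]
  · have : row ∈ st := List.mem_of_getElem? hm
    simpa [List.getD, hm] using tz_eq_zero_iff.mp h row this

lemma fillLoop_acc : ∀ (fuel : Nat) (st : List (List Int)) (k : Nat) (acc : List (List Int)),
    fillLoop fuel st k acc = ((fillLoop fuel st k []).1, acc ++ (fillLoop fuel st k []).2) := by
  intro fuel
  induction fuel with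
  | zero => intro st k acc; simp [fillLoop]
  | succ fuel ih =>
    intro st k acc
    simp only [fillLoop]
    by_cases hc : (0 : Int) ∈ st.getD k []
    · rw [if_pos hc, if_pos hc]
      rcases hfsi : find_start_index st with _ | ⟨r, j⟩ <;> dsimp only
      · simp
      · rw [ih (st.set r ((st.getD r []).set j 1)) k (acc ++ [[(r : Int) + 1, (j : Int) + 1]]),
          ih (st.set r ((st.getD r []).set j 1)) k ([] ++ [[(r : Int) + 1, (j : Int) + 1]])]
        simp
    · rw [if_neg hc, if_neg hc]
      simp

lemma zero_free_set {st : List (List Int)} {r j m : Nat}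
    (h : (0 : Int) ∉ st.getD m []) :
    (0 : Int) ∉ (st.set r ((st.getD r []).set j 1)).getD m [] := by
  by_cases hr : r < st.length
  · simp only [List.getD] at h ⊢
    by_cases hrm : r = m
    · subst hrm
      rw [List.getElem?_set_self (by simpa using hr), Option.getD_some]
      intro hmem
      rcases List.mem_or_eq_of_mem_set hmem with h1 | h1
      · exact h h1
      · cases h1
    · rw [List.getElem?_set_ne hrm]
      exact h
  · rw [List.set_eq_of_length_le (by omega)]
    exact h

lemma fillLoop_main : ∀ (fuel : Nat) (st : List (List Int)) (k : Nat), tz st ≤ fuel →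
    greedy (tz st) st = (fillLoop fuel st k []).2 ++ greedy (tz (fillLoop fuel st k []).1) (fillLoop fuel st k []).1
    ∧ (0 : Int) ∉ (fillLoop fuel st k []).1.getD k []
    ∧ (fillLoop fuel st k []).1.length = st.length
    ∧ ∀ m, (0 : Int) ∉ st.getD m [] → (0 : Int) ∉ (fillLoop fuel st k []).1.getD m [] := by
  intro fuel
  induction fuel with
  | zero =>
    intro st k h
    have h0 : tz st = 0 := by omega
    exact ⟨by simp [fillLoop], by simpa [fillLoop] using zero_free_getD_of_tz_zero h0 k,
      by simp [fillLoop], fun m hm => by simpa [fillLoop] using hm⟩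
  | succ fuel ih =>
    intro st k h
    simp only [fillLoop]
    by_cases hc : (0 : Int) ∈ st.getD k []
    · rw [if_pos hc]
      have htzpos : 0 < tz st := by
        rcases Nat.eq_zero_or_pos (tz st) with h0 | h0
        · exact absurd hc (zero_free_getD_of_tz_zero h0 k)
        · exact h0
      obtain ⟨k0, b, hp⟩ := pickMin_isSome_of_tz_pos htzpos
      obtain ⟨j0, hj0, hfsi⟩ := find_start_index_some hp
      rw [hfsi]
      dsimp only
      set st' := st.set k0 ((st.getD k0 []).set j0 1) with hst'
      have htz : tz st' + 1 = tz st := tz_step hp hj0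
      obtain ⟨ih1, ih2, ih3, ih4⟩ := ih st' k (by omega)
      simp only [List.nil_append]
      rw [fillLoop_acc fuel st' k [[(k0 : Int) + 1, (j0 : Int) + 1]]]
      refine ⟨?_, ih2, by rw [ih3, hst']; simp, fun m hm => ih4 m (zero_free_set hm)⟩
      have hgr : greedy (tz st) st = [(k0 : Int) + 1, (j0 : Int) + 1] :: greedy (tz st') st' := by
        rw [← htz]
        simp only [greedy, hfsi]
        rfl
      rw [hgr, ih1]
      simp
    · rw [if_neg hc]
      exact ⟨by simp, hc, rfl, fun m hm => hm⟩

lemma outer_acc : ∀ (ks : List Nat) (st : List (List Int)) (acc : List (List Int)),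
    ks.foldl (fun (p : (List (List Int)) × (List (List Int))) k => fillLoop (tz p.1) p.1 k p.2) (st, acc)
      = ((ks.foldl (fun (p : (List (List Int)) × (List (List Int))) k => fillLoop (tz p.1) p.1 k p.2) (st, [])).1,
         acc ++ (ks.foldl (fun (p : (List (List Int)) × (List (List Int))) k => fillLoop (tz p.1) p.1 k p.2) (st, [])).2) := by
  intro ks
  induction ks with
  | nil => intro st acc; simp
  | cons k ks ih =>
    intro st acc
    simp only [List.foldl_cons]
    rw [fillLoop_acc (tz st) st k acc, fillLoop_acc (tz st) st k []]
    simp only [List.nil_append]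
    rw [ih (fillLoop (tz st) st k []).1 (acc ++ (fillLoop (tz st) st k []).2),
        ih (fillLoop (tz st) st k []).1 (fillLoop (tz st) st k []).2]
    simp

lemma outer_main : ∀ (ks : List Nat) (st : List (List Int)),
    greedy (tz st) st
      = (ks.foldl (fun (p : (List (List Int)) × (List (List Int))) k => fillLoop (tz p.1) p.1 k p.2) (st, [])).2
        ++ greedy (tz (ks.foldl (fun (p : (List (List Int)) × (List (List Int))) k => fillLoop (tz p.1) p.1 k p.2) (st, [])).1)
                  (ks.foldl (fun (p : (List (List Int)) × (List (List Int))) k => fillLoop (tz p.1) p.1 k p.2) (st, [])).1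
    ∧ (ks.foldl (fun (p : (List (List Int)) × (List (List Int))) k => fillLoop (tz p.1) p.1 k p.2) (st, [])).1.length = st.length
    ∧ (∀ m, (0 : Int) ∉ st.getD m [] →
        (0 : Int) ∉ (ks.foldl (fun (p : (List (List Int)) × (List (List Int))) k => fillLoop (tz p.1) p.1 k p.2) (st, [])).1.getD m [])
    ∧ ∀ k ∈ ks, (0 : Int) ∉ (ks.foldl (fun (p : (List (List Int)) × (List (List Int))) k => fillLoop (tz p.1) p.1 k p.2) (st, [])).1.getD k [] := by
  intro ks
  induction ks with
  | nil => intro st; exact ⟨by simp, rfl, fun m hm => hm, by simp⟩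
  | cons k ks ih =>
    intro st
    simp only [List.foldl_cons]
    obtain ⟨f1, f2, f3, f4⟩ := fillLoop_main (tz st) st k le_rfl
    set S := fillLoop (tz st) st k [] with hS
    rw [outer_acc ks S.1 S.2]
    obtain ⟨i1, i2, i3, i4⟩ := ih S.1
    set T := ks.foldl (fun (p : (List (List Int)) × (List (List Int))) k => fillLoop (tz p.1) p.1 k p.2) (S.1, []) with hT
    refine ⟨?_, by rw [i2, f3], fun m hm => i3 m (f4 m hm), ?_⟩
    · rw [f1, i1]
      simp
    · intro k' hk'
      rcases List.mem_cons.mp hk' with rfl | hk'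
      · exact i3 k' f2
      · exact i4 k' hk'

lemma A_eq_greedy (cinema : List (List Int)) :
    order_of_seats cinema = greedy (tz cinema) cinema := by
  obtain ⟨m1, m2, m3, m4⟩ := outer_main (List.range cinema.length) cinema
  set T := (List.range cinema.length).foldl
      (fun (p : (List (List Int)) × (List (List Int))) k => fillLoop (tz p.1) p.1 k p.2) (cinema, []) with hT
  have htz : tz T.1 = 0 := by
    rw [tz_eq_zero_iff]
    intro n hn
    obtain ⟨idx, hidx, rfl⟩ := List.mem_iff_getElem.mp hn
    have hlt : idx < cinema.length := by rw [← m2]; exact hidx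
    have := m4 idx (List.mem_range.mpr hlt)
    simpa [List.getD, List.getElem?_eq_getElem hidx] using this
  rw [order_of_seats, ← hT, m1, htz]
  simp [greedy]

-- ---------- B side ----------
lemma zpos_cons (i x : Int) (row : List Int) (s : Int) :
    zpos i (x :: row) s = (if x = 0 then [[i + 1, s + 1]] else []) ++ zpos i row (s + 1) := by
  by_cases hx : x = 0 <;>
    simp [zpos, PySem.List.enumerate_cons, hx]

lemma zpos_append (i : Int) (x y : List Int) (s : Int) :
    zpos i (x ++ y) s = zpos i x s ++ zpos i y (s + x.length) := by
  simp [zpos, PySem.List.enumerate_append, List.filter_append]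

lemma zpos_nozero {row : List Int} (h : (0 : Int) ∉ row) (i s : Int) : zpos i row s = [] := by
  simp only [zpos, List.map_eq_nil_iff, List.filter_eq_nil_iff]
  intro q hq
  obtain ⟨m, hm, rfl⟩ := (PySem.List.mem_enumerate_iff _ _ _).mp hq
  simp only [decide_eq_true_eq]
  exact fun h0 => h (h0 ▸ List.getElem_mem hm)

lemma bucketsP_cons (n : List Int) (l : List (List Int)) (s c : Int) :
    bucketsP (n :: l) s c = (if (cnt n : Int) = c then zpos s n 0 else []) ++ bucketsP l (s + 1) c := by
  simp [bucketsP, PySem.List.enumerate_cons]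

lemma bucketsP_append (x y : List (List Int)) (s c : Int) :
    bucketsP (x ++ y) s c = bucketsP x s c ++ bucketsP y (s + x.length) c := by
  simp [bucketsP, PySem.List.enumerate_append]

lemma bucketsP_of_ne {l : List (List Int)} {c : Int} (h : ∀ n ∈ l, (cnt n : Int) ≠ c) (s : Int) :
    bucketsP l s c = [] := by
  induction l generalizing s with
  | nil => rfl
  | cons n l ih =>
    rw [bucketsP_cons, if_neg (h n List.mem_cons_self),
      ih (fun m hm => h m (List.mem_cons_of_mem _ hm)) (s + 1)]
    rfl

lemma flatMap_congr_mem {α β : Type} {l : List α} {f g : α → List β}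
    (h : ∀ x ∈ l, f x = g x) : l.flatMap f = l.flatMap g := by
  induction l with
  | nil => rfl
  | cons x l ih =>
    simp only [List.flatMap_cons, h x List.mem_cons_self,
      ih (fun y hy => h y (List.mem_cons_of_mem _ hy))]

-- the central step identity: one greedy fill peels the head off the bucket expression
lemma Bexpr_step {st : List (List Int)} {k : Nat} {b : List Int} {j : Nat} {M : Int}
    (hp : pickMin st = some (k, b)) (hj : PySem.List.index? b 0 = some j)
    (hM : ∀ row ∈ st, (cnt row : Int) ≤ M) :
    BexprM st M = [(k : Int) + 1, (j : Int) + 1] :: BexprM (st.set k ((st.getD k []).set j 1)) M := by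
  obtain ⟨hb, hmin, pre, suf, hsplit, hlen, hpre⟩ := pickMin_spec hp
  obtain ⟨bpre, bsuf, hb2, hjlen, hbpre⟩ := row_split hj
  have hcpos : 0 < cnt b := cnt_pos hb
  have hcM : (cnt b : Int) ≤ M := hM b (by rw [hsplit]; exact List.mem_append_right _ List.mem_cons_self)
  have hgetD : st.getD k [] = b := by rw [hsplit, ← hlen, getD_append_length]
  have hbset : b.set j 1 = bpre ++ (1 : Int) :: bsuf := by
    rw [hb2, ← hjlen, set_append_length]
  have hst' : st.set k ((st.getD k []).set j 1) = pre ++ (bpre ++ (1 : Int) :: bsuf) :: suf := by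
    rw [hgetD, hbset, hsplit, ← hlen, set_append_length]
  have hcnt_b : cnt b = cnt bsuf + 1 := by rw [hb2]; exact (cnt_split hbpre).1
  have hcnt_b' : cnt (bpre ++ (1 : Int) :: bsuf) = cnt bsuf := (cnt_split hbpre).2
  have hall : ∀ n ∈ st, (cnt n : Int) = 0 ∨ (cnt b : Int) ≤ cnt n := by
    intro n hn
    by_cases h0 : (0 : Int) ∈ n
    · right; exact_mod_cast hmin n hn h0
    · left; exact_mod_cast cnt_eq_zero.mpr h0
  have hpre' : ∀ n ∈ pre, (cnt n : Int) = 0 ∨ (cnt b : Int) < cnt n := by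
    intro n hn
    by_cases h0 : (0 : Int) ∈ n
    · right
      have h1 := hpre n hn
      have h2 : ¬ cnt n ≤ cnt b := fun hle => h1 ⟨h0, hle⟩
      have h3 : cnt b < cnt n := by omega
      exact_mod_cast h3
    · left; exact_mod_cast cnt_eq_zero.mpr h0
  have hsuf : ∀ n ∈ suf, (cnt n : Int) = 0 ∨ (cnt b : Int) ≤ cnt n := fun n hn =>
    hall n (by rw [hsplit]; exact List.mem_append_right _ (List.mem_cons_of_mem _ hn))
  -- buckets strictly below cnt b are empty for st
  have hempty_st : ∀ c : Int, 1 ≤ c → c < (cnt b : Int) → bucketsP st 0 c = [] := by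
    intro c h1 h2
    exact bucketsP_of_ne (fun n hn => by rcases hall n hn with h | h <;> omega) 0
  -- buckets strictly below cnt b - 1 are empty for st', and pre/suf contribute nothing at cnt b - 1
  have hempty_st' : ∀ c : Int, 1 ≤ c → c < (cnt b : Int) - 1 →
      bucketsP (pre ++ (bpre ++ (1 : Int) :: bsuf) :: suf) 0 c = [] := by
    intro c h1 h2
    refine bucketsP_of_ne (fun n hn => ?_) 0
    rcases List.mem_append.mp hn with h | h
    · rcases hpre' n h with hh | hh <;> omega
    · rcases List.mem_cons.mp h with rfl | h
      · rw [hcnt_b']; omega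
      · rcases hsuf n h with hh | hh <;> omega
  -- the head zpos identity
  have hzpos : zpos (k : Int) b 0 = [(k : Int) + 1, (j : Int) + 1] :: zpos (k : Int) (bpre ++ (1 : Int) :: bsuf) 0 := by
    rw [hb2, zpos_append, zpos_append, zpos_cons, zpos_cons, if_pos rfl, if_neg one_ne_zero,
      zpos_nozero hbpre]
    simp [hjlen]
  -- bucket at cnt b
  have hbk_st : bucketsP st 0 (cnt b) = zpos (k : Int) b 0 ++ bucketsP suf ((k : Int) + 1) (cnt b) := by
    rw [hsplit, bucketsP_append, bucketsP_cons, if_pos rfl,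
      bucketsP_of_ne (fun n hn => by rcases hpre' n hn with h | h <;> omega) 0]
    simp [hlen]
  have hbk_st' : bucketsP (pre ++ (bpre ++ (1 : Int) :: bsuf) :: suf) 0 (cnt b)
      = bucketsP suf ((k : Int) + 1) (cnt b) := by
    rw [bucketsP_append, bucketsP_cons, if_neg (by rw [hcnt_b']; omega),
      bucketsP_of_ne (fun n hn => by rcases hpre' n hn with h | h <;> omega) 0]
    simp [hlen]
  -- buckets above cnt b agree
  have hhigh : ∀ c : Int, (cnt b : Int) < c →
      bucketsP st 0 c = bucketsP (pre ++ (bpre ++ (1 : Int) :: bsuf) :: suf) 0 c := by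
    intro c hcc
    rw [hsplit, bucketsP_append, bucketsP_append, bucketsP_cons, bucketsP_cons,
      if_neg (by omega), if_neg (by rw [hcnt_b']; omega)]
  -- assemble
  rw [hst']
  unfold BexprM
  rw [PySem.List.pyRange_one_append 1 (cnt b) (M + 1) (by omega) (by omega),
    PySem.List.pyRange_one_cons (by omega : (cnt b : Int) < M + 1),
    List.flatMap_append, List.flatMap_append, List.flatMap_cons, List.flatMap_cons]
  have hA : (PySem.List.pyRange 1 (cnt b) 1).flatMap (fun c => bucketsP st 0 c) = [] := by
    rw [List.flatMap_eq_nil_iff]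
    intro c hc
    obtain ⟨h1, h2⟩ := PySem.List.mem_pyRange_one.mp hc
    exact hempty_st c h1 h2
  have hA' : (PySem.List.pyRange 1 (cnt b) 1).flatMap
      (fun c => bucketsP (pre ++ (bpre ++ (1 : Int) :: bsuf) :: suf) 0 c)
      = zpos (k : Int) (bpre ++ (1 : Int) :: bsuf) 0 := by
    by_cases hone : (cnt b : Int) = 1
    · rw [hone, PySem.List.pyRange_one_eq_nil (by omega)]
      rw [zpos_nozero (cnt_eq_zero.mp (by omega)) (k : Int) 0]
      rfl
    · rw [PySem.List.pyRange_one_append 1 ((cnt b : Int) - 1) (cnt b) (by omega) (by omega),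
        PySem.List.pyRange_one_cons (by omega : (cnt b : Int) - 1 < (cnt b : Int)),
        PySem.List.pyRange_one_eq_nil (by omega : (cnt b : Int) ≤ (cnt b : Int) - 1 + 1),
        List.flatMap_append, List.flatMap_cons, List.flatMap_nil]
      have h1 : (PySem.List.pyRange 1 ((cnt b : Int) - 1) 1).flatMap
          (fun c => bucketsP (pre ++ (bpre ++ (1 : Int) :: bsuf) :: suf) 0 c) = [] := by
        rw [List.flatMap_eq_nil_iff]
        intro c hc
        obtain ⟨hx, hy⟩ := PySem.List.mem_pyRange_one.mp hc
        exact hempty_st' c hx hy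
      have h2 : bucketsP (pre ++ (bpre ++ (1 : Int) :: bsuf) :: suf) 0 ((cnt b : Int) - 1)
          = zpos (k : Int) (bpre ++ (1 : Int) :: bsuf) 0 := by
        rw [bucketsP_append, bucketsP_cons, if_pos (by rw [hcnt_b']; omega),
          bucketsP_of_ne (fun n hn => by rcases hpre' n hn with h | h <;> omega) 0,
          bucketsP_of_ne (fun n hn => by rcases hsuf n hn with h | h <;> omega) _]
        simp [hlen]
      rw [h1, h2]
      simp
  have hR : (PySem.List.pyRange ((cnt b : Int) + 1) (M + 1) 1).flatMap (fun c => bucketsP st 0 c)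
      = (PySem.List.pyRange ((cnt b : Int) + 1) (M + 1) 1).flatMap
          (fun c => bucketsP (pre ++ (bpre ++ (1 : Int) :: bsuf) :: suf) 0 c) := by
    refine flatMap_congr_mem (fun c hc => ?_)
    obtain ⟨h1, _⟩ := PySem.List.mem_pyRange_one.mp hc
    exact hhigh c (by omega)
  rw [hA, hA', hbk_st, hbk_st', hzpos, hR]
  simp

lemma B_eq_BexprM (cinema : List (List Int)) :
    order_of_seats_alt cinema =
      BexprM cinema (PySem.List.maxD (((PySem.List.enumerate cinema).map
        (fun p => ((PySem.List.count p.2 0 : Int), p.1, p.2))).map (fun t => t.1)) (fun x => x) 0) := by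
  unfold order_of_seats_alt
  have hmid : ∀ (c : Int) (acc : List (List Int)),
      (((PySem.List.enumerate cinema).map (fun p => ((PySem.List.count p.2 0 : Int), p.1, p.2))).foldl
        (fun acc2 t => if t.1 = c then
          (PySem.List.enumerate t.2.2).foldl (fun acc3 q =>
            if q.2 = 0 then acc3 ++ [[t.2.1 + 1, q.1 + 1]] else acc3) acc2
        else acc2) acc)
      = acc ++ bucketsP cinema 0 c := by
    intro c acc
    rw [PySem.List.foldl_congr_mem _ _
      (fun acc2 t => acc2 ++ (if t.1 = c then zpos t.2.1 t.2.2 0 else [])) _ ?_]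
    · rw [PySem.List.foldl_append_eq_flatMap, List.flatMap_map]
      rfl
    · intro acc2 t ht
      dsimp only
      by_cases hc : t.1 = c
      · rw [if_pos hc, if_pos hc]
        exact PySem.List.foldl_append_ite (fun (q : Int × Int) => q.2 = (0 : Int))
          (fun (q : Int × Int) => [t.2.1 + 1, q.1 + 1]) _ acc2
      · rw [if_neg hc, if_neg hc, List.append_nil]
  rw [PySem.List.foldl_congr_mem _ _ (fun acc c => acc ++ bucketsP cinema 0 c) _
    (fun acc c _ => hmid c acc)]
  rw [PySem.List.foldl_append_eq_flatMap]
  rfl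

lemma maxD_bound (cinema : List (List Int)) :
    ∀ row ∈ cinema, (cnt row : Int) ≤
      PySem.List.maxD (((PySem.List.enumerate cinema).map
        (fun p => ((PySem.List.count p.2 0 : Int), p.1, p.2))).map (fun t => t.1)) (fun x => x) 0 := by
  intro row hrow
  have hmem : (cnt row : Int) ∈ (((PySem.List.enumerate cinema).map
      (fun p => ((PySem.List.count p.2 0 : Int), p.1, p.2))).map (fun t => t.1)) := by
    have h1 : row ∈ (PySem.List.enumerate cinema 0).map (fun x => x.2) := by
      rw [PySem.List.map_snd_enumerate]
      exact hrow
    obtain ⟨p, hp, hp2⟩ := List.mem_map.mp h1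
    rw [List.map_map]
    exact List.mem_map.mpr ⟨p, hp, by rw [← hp2]; rfl⟩
  unfold PySem.List.maxD
  rcases hmax : PySem.List.max? (((PySem.List.enumerate cinema).map
      (fun p => ((PySem.List.count p.2 0 : Int), p.1, p.2))).map (fun t => t.1)) (fun x => x) with _ | m
  · rw [(PySem.List.max?_eq_none_iff _ _).mp hmax] at hmem
    cases hmem
  · rw [hmax]
    exact PySem.List.max?_isMax hmax _ hmem

lemma BexprM_eq_greedy (t : Nat) (st : List (List Int)) (M : Int)
    (ht : tz st = t) (hM : ∀ row ∈ st, (cnt row : Int) ≤ M) :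
    BexprM st M = greedy t st := by
  induction t generalizing st with
  | zero =>
    have hall := tz_eq_zero_iff.mp ht
    have hnil : BexprM st M = [] := by
      unfold BexprM
      rw [List.flatMap_eq_nil_iff]
      intro c hc
      obtain ⟨h1, _⟩ := PySem.List.mem_pyRange_one.mp hc
      refine bucketsP_of_ne (fun n hn => ?_) 0
      have : cnt n = 0 := cnt_eq_zero.mpr (hall n hn)
      omega
    rw [hnil]
    rfl
  | succ t ih =>
    obtain ⟨k, b, hp⟩ := pickMin_isSome_of_tz_pos (st := st) (by omega)
    obtain ⟨j, hj, hfsi⟩ := find_start_index_some hp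
    have hstep := tz_step hp hj
    have hM' : ∀ row ∈ st.set k ((st.getD k []).set j 1), (cnt row : Int) ≤ M := by
      intro row hrow
      rcases List.mem_or_eq_of_mem_set hrow with h | h
      · exact hM row h
      · obtain ⟨hb, _, pre, suf, hsplit, hlen, _⟩ := pickMin_spec hp
        obtain ⟨bpre, bsuf, hb2, hjlen, hbpre⟩ := row_split hj
        have hgetD : st.getD k [] = b := by rw [hsplit, ← hlen, getD_append_length]
        have h1 : cnt row = cnt bsuf := by
          rw [h, hgetD, hb2, ← hjlen, set_append_length]
          exact (cnt_split hbpre).2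
        have h2 : cnt b = cnt bsuf + 1 := by rw [hb2]; exact (cnt_split hbpre).1
        have h3 := hM b (by rw [hsplit]; exact List.mem_append_right _ List.mem_cons_self)
        omega
    have hgr : greedy (t + 1) st = [(k : Int) + 1, (j : Int) + 1]
        :: greedy t (st.set k ((st.getD k []).set j 1)) := by
      simp only [greedy, hfsi]
    rw [Bexpr_step hp hj hM, hgr, ih (st.set k ((st.getD k []).set j 1)) (by omega) hM']

theorem order_of_seats_spec : Claim_equal_order_of_seats := by
  intro cinema _
  unfold Spec_order_of_seats
  rw [A_eq_greedy, B_eq_BexprM, BexprM_eq_greedy (tz cinema) cinema _ rfl (maxD_bound cinema)]
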